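-- pv_equiv track=rewrite | github.com/joshlarue/adventofcode | day11/space.py | setGalaxyNums
-- ===== SOURCE A (Python) =====
-- def setGalaxyNums(rows):
--     numberedGalaxies = []
--     galaxyNum = 1
--     for i, row in enumerate(rows):
--         numberedLine = list(row)
--         for j, char in enumerate(numberedLine):
--             if char == '#':
--                 numberedLine[j] = f'{galaxyNum}'
--                 galaxyNum += 1
--         numberedGalaxies.append(''.join(numberedLine))
--     return numberedGalaxies
-- ===== SOURCE B (Python) =====
-- def setGalaxyNums(rows):
--     counts = [row.count('#') for row in rows]
--     offsets = []
--     total = 0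
--     for c in counts:
--         offsets.append(total)
--         total += c
--     result = []
--     for row, off in zip(rows, offsets):
--         before = []
--         seen = 0
--         for ch in row:
--             before.append(seen)
--             seen += ch == '#'
--         result.append(''.join(str(off + before[j] + 1) if ch == '#' else ch
--                               for j, ch in enumerate(row)))
--     return result
-- ===== Notes on version B (the rewrite author's own statement) =====
-- stated objective: alternative
-- what changed: Replaces A's single pass that threads a mutable galaxy counter through nested loops and mutates each line in place by a stateless two-phase computation: per-row '#' counts give prefix-sum base offsets, a per-row prefix-sum table gives each galaxy's index within its row, and each row is rebuilt by a comprehension deriving every number arithmetically.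
import Mathlib
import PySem

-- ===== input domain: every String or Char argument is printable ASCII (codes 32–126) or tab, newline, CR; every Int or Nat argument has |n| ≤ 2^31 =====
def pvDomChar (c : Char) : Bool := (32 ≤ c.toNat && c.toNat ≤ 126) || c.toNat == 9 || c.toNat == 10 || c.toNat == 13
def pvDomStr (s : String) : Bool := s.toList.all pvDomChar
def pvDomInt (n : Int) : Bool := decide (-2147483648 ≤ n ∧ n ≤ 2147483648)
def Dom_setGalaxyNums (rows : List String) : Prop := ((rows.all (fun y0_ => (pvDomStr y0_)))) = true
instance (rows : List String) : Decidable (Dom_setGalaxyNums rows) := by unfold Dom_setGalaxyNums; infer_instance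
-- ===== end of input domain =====

-- B replaces A's galaxy counter threaded through nested loops (mutating each line
-- in place) by a stateless two-phase computation over prefix-sum tables; same
-- result, no speed claim.

-- ===== PORT A =====
-- inner loop of A: walk the row's characters threading galaxyNum
def goRowA (n : Int) : List Char → Int × List String
  | [] => (n, [])
  | c :: cs =>
    if c = '#' then
      let r := goRowA (n + 1) cs
      (r.1, PySem.Int.toStr n :: r.2)
    else
      let r := goRowA n cs
      (r.1, String.ofList [c] :: r.2)

def setGalaxyNums (rows : List String) : List String :=
  (rows.foldl (fun (st : Int × List String) row =>
      let r := goRowA st.1 row.toList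
      (r.1, st.2 ++ [PySem.Str.join "" r.2])) ((1 : Int), ([] : List String))).2

-- ===== PORT B =====
-- ''.join(str(off + before[j] + 1) if ch == '#' else ch for j, ch in enumerate(row));
-- before[j] is always in range (before has one entry per character), so the pyGetD
-- default 0 is never consulted and the port is exact.
def pvNumberRow (row : String) (off : Int) : String :=
  let before : List Int := (row.toList.foldl (fun (st : List Int × Int) ch =>
      (st.1 ++ [st.2], st.2 + (if ch = '#' then 1 else 0))) (([] : List Int), (0 : Int))).1
  PySem.Str.join "" ((PySem.List.enumerate row.toList 0).map (fun p =>
    if p.2 = '#' then PySem.Int.toStr (off + PySem.List.pyGetD before p.1 0 + 1)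
    else String.ofList [p.2]))

def setGalaxyNums_alt (rows : List String) : List String :=
  let counts : List Int := rows.map (fun row => (PySem.Str.count row "#" : Int))
  let offsets : List Int :=
    (counts.foldl (fun (st : List Int × Int) c => (st.1 ++ [st.2], st.2 + c)) (([] : List Int), (0 : Int))).1
  (rows.zip offsets).map (fun p => pvNumberRow p.1 p.2)

-- ===== PRECONDITION & SPEC =====
def Spec_setGalaxyNums (rows : List String) (out : List String) : Prop := out = setGalaxyNums_alt rows
instance (rows : List String) (out : List String) : Decidable (Spec_setGalaxyNums rows out) := by unfold Spec_setGalaxyNums; infer_instance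

-- ===== CLAIM (what is proved, stated in full; the proofs are below) =====
def Claim_equal_setGalaxyNums : Prop := ∀ (rows : List String), Dom_setGalaxyNums rows → Spec_setGalaxyNums rows (setGalaxyNums rows)

-- ===== LEMMAS AND PROOFS =====

-- common reference shape: the numbered strings of one row, base offset b
def rowSpec (b : Int) : List Char → List String
  | [] => []
  | c :: cs =>
    if c = '#' then PySem.Int.toStr (b + 1) :: rowSpec (b + 1) cs
    else String.ofList [c] :: rowSpec b cs

-- common reference shape: the whole grid, base offset b
def outSpec (b : Int) : List String → List String
  | [] => []
  | r :: rs => PySem.Str.join "" (rowSpec b r.toList) :: outSpec (b + (r.toList.count '#' : Int)) rs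

-- the prefix-sum list of xs starting at b (what both accumulate-append loops build)
def prefixes (b : Int) : List Int → List Int
  | [] => []
  | c :: cs => b :: prefixes (b + c) cs

theorem goRowA_eq (cs : List Char) : ∀ (n : Int),
    goRowA n cs = (n + (cs.count '#' : Int), rowSpec (n - 1) cs) := by
  induction cs with
  | nil => intro n; simp [goRowA, rowSpec]
  | cons c cs ih =>
    intro n
    by_cases hc : c = '#'
    · simp [goRowA, rowSpec, hc, ih]
      omega
    · simp [goRowA, rowSpec, hc, ih]

theorem count_go_single (cs : List Char) : ∀ (fuel acc : Nat), cs.length ≤ fuel →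
    PySem.Chars.count.go ['#'] fuel cs acc = acc + cs.count '#' := by
  induction cs with
  | nil =>
    intro fuel acc _
    cases fuel <;> simp [PySem.Chars.count.go]
  | cons c cs ih =>
    intro fuel acc h
    cases fuel with
    | zero => simp at h
    | succ f =>
      simp only [PySem.Chars.count.go]
      by_cases hc : c = '#'
      · simp [hc, List.isPrefixOf, ih f (acc + 1) (by simpa using h)]
        omega
      · have : List.isPrefixOf ['#'] (c :: cs) = false := by
          simp [List.isPrefixOf]; exact fun h' => hc h'.symm
        simp [this, ih f acc (by simpa using h), hc]

theorem count_single (cs : List Char) : PySem.Chars.count cs ['#'] = cs.count '#' := by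
  simpa [PySem.Chars.count] using count_go_single cs cs.length 0 le_rfl

theorem strCount_single (s : String) : PySem.Str.count s "#" = s.toList.count '#' := by
  simp only [PySem.Str.count_eq]
  exact count_single s.toList

-- the accumulate-append loop builds exactly the prefix-sum list
theorem foldpref (xs : List Int) : ∀ (acc : List Int) (t : Int),
    (xs.foldl (fun (st : List Int × Int) c => (st.1 ++ [st.2], st.2 + c)) (acc, t)).1
      = acc ++ prefixes t xs := by
  induction xs with
  | nil => intro acc t; simp [prefixes]
  | cons c cs ih =>
    intro acc t
    rw [List.foldl_cons, ih]
    simp [prefixes]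

theorem prefixes_getElem? (xs : List Int) : ∀ (t : Int) (j : Nat), j < xs.length →
    (prefixes t xs)[j]? = some (t + (xs.take j).sum) := by
  induction xs with
  | nil => intro t j h; simp at h
  | cons c cs ih =>
    intro t j h
    cases j with
    | zero => simp [prefixes]
    | succ j =>
      simp only [prefixes, List.getElem?_cons_succ, List.take_succ_cons, List.sum_cons]
      rw [ih (t + c) j (by simpa using h)]
      congr 1
      ring

-- sum of the '#'-indicator values is the '#'-count
theorem ind_sum (l : List Char) :
    ((l.map (fun ch => if ch = '#' then (1 : Int) else 0)).sum) = (l.count '#' : Int) := by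
  induction l with
  | nil => simp
  | cons c cs ih =>
    by_cases hc : c = '#'
    · simp [hc, ih]
      ring
    · simp [hc, ih]

-- the enumerate-comprehension of B equals rowSpec, prefix by prefix
theorem enum_map_eq (cs : List Char) : ∀ (pre : List Char) (off : Int),
    (PySem.List.enumerate cs (pre.length : Int)).map (fun p =>
        if p.2 = '#' then
          PySem.Int.toStr (off + PySem.List.pyGetD
            (prefixes 0 ((pre ++ cs).map (fun ch => if ch = '#' then (1 : Int) else 0))) p.1 0 + 1)
        else String.ofList [p.2])
      = rowSpec (off + (pre.count '#' : Int)) cs := by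
  induction cs with
  | nil => intro pre off; simp [PySem.List.enumerate, rowSpec]
  | cons c cs ih =>
    intro pre off
    have hget : PySem.List.pyGetD
        (prefixes 0 ((pre ++ c :: cs).map (fun ch => if ch = '#' then (1 : Int) else 0)))
        ((pre.length : Nat) : Int) 0 = (pre.count '#' : Int) := by
      rw [PySem.List.pyGetD_natCast]
      rw [List.getD_eq_getElem?_getD, prefixes_getElem? _ 0 pre.length (by simp)]
      rw [List.map_append, List.take_left']
      · simp [ind_sum]
      · simp
    have hstep := ih (pre ++ [c]) off
    have h1 : ((pre ++ [c]).length : Int) = (pre.length : Int) + 1 := by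
      push_cast [List.length_append, List.length_cons, List.length_nil]; ring
    rw [h1, List.append_assoc] at hstep
    simp only [List.singleton_append] at hstep
    rw [PySem.List.enumerate_cons, List.map_cons]
    by_cases hc : c = '#'
    · subst hc
      have h2 : ((pre ++ ['#']).count '#' : Int) = (pre.count '#' : Int) + 1 := by
        simp [List.count_append]
      rw [h2, ← add_assoc] at hstep
      simp at hget hstep
      simp [hget, hstep, rowSpec]
    · have h2 : ((pre ++ [c]).count '#' : Int) = (pre.count '#' : Int) := by
        simp [List.count_append, hc]
      rw [h2] at hstep
      simp [hc] at hstep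
      simp [hc, hstep, rowSpec]

theorem pvNumberRow_eq (row : String) (off : Int) :
    pvNumberRow row off = PySem.Str.join "" (rowSpec off row.toList) := by
  have hz : pvNumberRow row off
      = PySem.Str.join "" ((PySem.List.enumerate row.toList 0).map (fun p =>
          if p.2 = '#' then
            PySem.Int.toStr (off + PySem.List.pyGetD
              ((row.toList.foldl (fun (st : List Int × Int) ch =>
                  (st.1 ++ [st.2], st.2 + (if ch = '#' then 1 else 0))) (([] : List Int), (0 : Int))).1) p.1 0 + 1)
          else String.ofList [p.2])) := rfl
  have hb : (row.toList.foldl (fun (st : List Int × Int) ch =>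
        (st.1 ++ [st.2], st.2 + (if ch = '#' then 1 else 0))) (([] : List Int), (0 : Int))).1
      = prefixes 0 (row.toList.map (fun ch => if ch = '#' then (1 : Int) else 0)) := by
    have hm := List.foldl_map (f := fun ch : Char => if ch = '#' then (1 : Int) else 0)
      (g := fun (st : List Int × Int) c => (st.1 ++ [st.2], st.2 + c)) (l := row.toList)
      (init := (([] : List Int), (0 : Int)))
    have hswap : (row.toList.foldl (fun (st : List Int × Int) ch =>
          (st.1 ++ [st.2], st.2 + (if ch = '#' then 1 else 0))) (([] : List Int), (0 : Int)))
        = ((row.toList.map (fun ch => if ch = '#' then (1 : Int) else 0)).foldl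
            (fun (st : List Int × Int) c => (st.1 ++ [st.2], st.2 + c)) (([] : List Int), (0 : Int))) :=
      hm.symm
    rw [hswap, foldpref]
    simp
  rw [hz, hb]
  have h := enum_map_eq row.toList [] off
  simp only [List.length_nil, Nat.cast_zero, List.count_nil, Nat.cast_zero, add_zero,
    List.nil_append] at h
  rw [h]

-- A's fold equals outSpec
theorem foldA_eq' (rows : List String) : ∀ (g : Int) (acc : List String),
    (rows.foldl (fun (st : Int × List String) row =>
        (st.1 + (row.toList.count '#' : Int),
         st.2 ++ [PySem.Str.join "" (rowSpec (st.1 - 1) row.toList)])) (g, acc)).2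
      = acc ++ outSpec (g - 1) rows := by
  induction rows with
  | nil => intro g acc; simp [outSpec]
  | cons r rs ih =>
    intro g acc
    rw [List.foldl_cons, ih]
    have h : g + (r.toList.count '#' : Int) - 1 = g - 1 + (r.toList.count '#' : Int) := by ring
    rw [h]
    simp [outSpec]

theorem foldA_eq (rows : List String) (g : Int) (acc : List String) :
    (rows.foldl (fun (st : Int × List String) row =>
        let r := goRowA st.1 row.toList
        (r.1, st.2 ++ [PySem.Str.join "" r.2])) (g, acc)).2
      = acc ++ outSpec (g - 1) rows := by
  have hf : (fun (st : Int × List String) (row : String) =>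
        let r := goRowA st.1 row.toList
        (r.1, st.2 ++ [PySem.Str.join "" r.2]))
      = (fun (st : Int × List String) (row : String) =>
        (st.1 + (row.toList.count '#' : Int),
         st.2 ++ [PySem.Str.join "" (rowSpec (st.1 - 1) row.toList)])) := by
    funext st row
    simp [goRowA_eq]
  rw [hf, foldA_eq']

-- B's zip-with-offsets equals outSpec
theorem zip_prefixes_eq (rows : List String) : ∀ (b : Int),
    ((rows.zip (prefixes b (rows.map (fun row => (PySem.Str.count row "#" : Int))))).map
        (fun p => pvNumberRow p.1 p.2))
      = outSpec b rows := by
  induction rows with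
  | nil => intro b; simp [outSpec]
  | cons r rs ih =>
    intro b
    simp only [List.map_cons, prefixes, List.zip_cons_cons, List.map_cons, outSpec]
    rw [pvNumberRow_eq, ih, strCount_single]

theorem alt_eq (rows : List String) : setGalaxyNums_alt rows = outSpec 0 rows := by
  have hz : setGalaxyNums_alt rows
      = ((rows.zip (((rows.map (fun row => (PySem.Str.count row "#" : Int))).foldl
          (fun (st : List Int × Int) c => (st.1 ++ [st.2], st.2 + c)) (([] : List Int), (0 : Int))).1)).map
            (fun p => pvNumberRow p.1 p.2)) := rfl
  rw [hz, foldpref]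
  simp only [List.nil_append]
  exact zip_prefixes_eq rows 0

-- ===== VERDICT (by name: the statement is the Claim_ definition above) =====
theorem setGalaxyNums_spec : Claim_equal_setGalaxyNums := by
  intro rows _
  unfold Spec_setGalaxyNums setGalaxyNums
  rw [foldA_eq rows 1 [], alt_eq]
  simp
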